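-- pv_equiv track=rewrite | github.com/raymon-02/uwq-algo | 15_hw/02_longest_most_frequent_prefix.py | longest_most_frequent_prefix
-- ===== SOURCE A (Python) =====
-- class Node:
--     def __init__(self):
--         self.nodes = {}
--         self.count = 0
--
-- def longest_most_frequent_prefix(strings):
--     result, ri, count = "", 0, 0
--
--     trie = Node()
--     for string in strings:
--         curr = trie
--         for i, ch in enumerate(string):
--             if ch not in curr.nodes:
--                 curr.nodes[ch] = Node()
--             curr.nodes[ch].count += 1
--
--             if curr.nodes[ch].count > count or curr.nodes[ch].count == count and i + 1 > ri:
--                 result, ri, count = string, i + 1, curr.nodes[ch].count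
--
--             curr = curr.nodes[ch]
--
--     return result[:ri]
-- ===== SOURCE B (Python) =====
-- def longest_most_frequent_prefix(strings):
--     result, ri, best = "", 0, 0
--     counts = {}
--     for string in strings:
--         for i, _ch in enumerate(string):
--             prefix = string[:i + 1]
--             c = counts.get(prefix, 0) + 1
--             counts[prefix] = c
--             if c > best or c == best and i + 1 > ri:
--                 result, ri, best = string, i + 1, c
--     return result[:ri]
-- ===== Notes on version B (the rewrite author's own statement) =====
-- stated objective: simpler
-- what changed: Replaces the Node/trie data structure and the stateful walk down child pointers with a single flat dict mapping each prefix string to its running count, keeping the identical incremental update and tie-break rule.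
import Mathlib
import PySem

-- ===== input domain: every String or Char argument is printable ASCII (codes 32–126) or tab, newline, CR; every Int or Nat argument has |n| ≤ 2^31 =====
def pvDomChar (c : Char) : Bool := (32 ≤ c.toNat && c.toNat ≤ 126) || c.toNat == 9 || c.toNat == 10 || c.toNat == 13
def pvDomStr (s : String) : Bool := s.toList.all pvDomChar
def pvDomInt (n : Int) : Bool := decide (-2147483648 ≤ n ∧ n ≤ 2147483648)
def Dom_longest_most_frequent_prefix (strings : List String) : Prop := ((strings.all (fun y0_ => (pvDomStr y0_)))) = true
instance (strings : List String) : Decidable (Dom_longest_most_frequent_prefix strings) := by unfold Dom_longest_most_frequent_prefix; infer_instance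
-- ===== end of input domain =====

-- B replaces A's trie of Node objects by one flat dict from prefix string to count (same scan, same update rule): simpler data structure, no speed claim.

-- ===== PORT A =====
-- the trie: a Node is (children, count); children are an explicit inline list
-- (char, child's children, child's count, rest) so no nested inductive is needed
inductive PChildren : Type
  | nil : PChildren
  | cons : Char → PChildren → Int → PChildren → PChildren
  deriving DecidableEq

-- curr.nodes[ch] lookup (dict: first match)
def childGet? : PChildren → Char → Option (PChildren × Int)
  | .nil, _ => none
  | .cons c sub cnt rest, ch =>
      if c = ch then some (sub, cnt) else childGet? rest ch

-- curr.nodes[ch] = t (dict: overwrite in place, new keys append)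
def childSet : PChildren → Char → PChildren × Int → PChildren
  | .nil, ch, t => .cons ch t.1 t.2 .nil
  | .cons c sub cnt rest, ch, t =>
      if c = ch then .cons c t.1 t.2 rest else .cons c sub cnt (childSet rest ch t)

-- inner 'for i, ch in enumerate(string)' loop of A; the in-place mutation of the
-- trie along the walked path is modelled by writing the updated child back (exact)
def trieLoop : PChildren × Int → List (Int × Char) → String → String × Int × Int → (PChildren × Int) × (String × Int × Int)
  | node, [], _, st => (node, st)
  | node, (i, ch) :: rest, full, st =>
      -- if ch not in curr.nodes: curr.nodes[ch] = Node();  curr.nodes[ch].count += 1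
      let child0 := (childGet? node.1 ch).getD (.nil, 0)
      let child : PChildren × Int := (child0.1, child0.2 + 1)
      let st' := if child.2 > st.2.2 ∨ (child.2 = st.2.2 ∧ i + 1 > st.2.1)
                 then (full, i + 1, child.2) else st
      let r := trieLoop child rest full st'
      ((childSet node.1 ch r.1, node.2), r.2)

def longest_most_frequent_prefix (strings : List String) : String :=
  let fin := strings.foldl
    (fun acc string => trieLoop acc.1 (PySem.List.enumerate string.toList 0) string acc.2)
    (((.nil, 0) : PChildren × Int), ("", 0, 0))
  PySem.Str.slice fin.2.1 none (some fin.2.2.1)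

-- ===== PORT B =====
-- inner loop of B: counts[string[:i+1]] = counts.get(...,0) + 1, same update rule
def dictLoop : PySem.Dict String Int → List (Int × Char) → String → String × Int × Int → PySem.Dict String Int × (String × Int × Int)
  | d, [], _, st => (d, st)
  | d, (i, _) :: rest, full, st =>
      let pref := PySem.Str.slice full none (some (i + 1))
      let c := d.getD pref 0 + 1
      let st' := if c > st.2.2 ∨ (c = st.2.2 ∧ i + 1 > st.2.1)
                 then (full, i + 1, c) else st
      dictLoop (d.insert pref c) rest full st'

def longest_most_frequent_prefix_alt (strings : List String) : String :=
  let fin := strings.foldl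
    (fun acc string => dictLoop acc.1 (PySem.List.enumerate string.toList 0) string acc.2)
    (PySem.Dict.empty, ("", 0, 0))
  PySem.Str.slice fin.2.1 none (some fin.2.2.1)

-- ===== PRECONDITION & SPEC =====
def Spec_longest_most_frequent_prefix (strings : List String) (out : String) : Prop := out = longest_most_frequent_prefix_alt strings
instance (strings : List String) (out : String) : Decidable (Spec_longest_most_frequent_prefix strings out) := by unfold Spec_longest_most_frequent_prefix; infer_instance

-- ===== CLAIM (what is proved, stated in full; the proofs are below) =====
def Claim_equal_longest_most_frequent_prefix : Prop := ∀ (strings : List String), Dom_longest_most_frequent_prefix strings → Spec_longest_most_frequent_prefix strings (longest_most_frequent_prefix strings)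

-- ===== LEMMAS AND PROOFS =====

-- count stored in the trie at a (nonempty) path
def cntAt : PChildren × Int → List Char → Int
  | t, [] => t.2
  | t, c :: q =>
      match childGet? t.1 c with
      | none => 0
      | some u => cntAt u q

theorem childGet?_childSet_self (ns : PChildren) (ch : Char) (t : PChildren × Int) :
    childGet? (childSet ns ch t) ch = some t := by
  induction ns with
  | nil => simp [childSet, childGet?]
  | cons c sub cnt rest ih1 ih2 =>
      by_cases h : c = ch
      · simp [childSet, childGet?, h]
      · simp [childSet, childGet?, h, ih2]

theorem childGet?_childSet_ne (ns : PChildren) (ch c : Char) (t : PChildren × Int) (h : c ≠ ch) :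
    childGet? (childSet ns ch t) c = childGet? ns c := by
  have hchc : ¬ ch = c := fun e => h e.symm
  induction ns with
  | nil => simp [childSet, childGet?, hchc]
  | cons c' sub cnt rest ih1 ih2 =>
      by_cases h' : c' = ch
      · subst h'
        simp [childSet, childGet?, hchc]
      · by_cases h2 : c' = c
        · subst h2
          simp [childSet, childGet?, h']
        · simp [childSet, childGet?, h', h2, ih2]

theorem key_eq (full : String) (k : Nat) :
    PySem.Str.slice full none (some ((k : Int) + 1)) = String.ofList (full.toList.take (k + 1)) := by
  have h : ((k : Int) + 1) = ((k + 1 : Nat) : Int) := by push_cast; ring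
  have h2 : PySem.List.slice full.toList none (some ((k : Int) + 1)) = full.toList.take (k + 1) := by
    rw [h]; exact PySem.List.slice_to_natCast full.toList (k + 1)
  simp only [PySem.Str.slice, PySem.Chars.slice, h2]

theorem ofList_inj {l1 l2 : List Char} (h : String.ofList l1 = String.ofList l2) : l1 = l2 := by
  have := congrArg String.toList h; simpa using this

-- the inner loops agree: same result state, and the counts stored in the (sub)trie at
-- path p ++ q equal the dict entries at key p ++ q, everything else in the dict untouched
theorem cntAt_cons (node : PChildren × Int) (ch : Char) (q : List Char) (hq : q ≠ []) :
    cntAt node (ch :: q) = cntAt ((childGet? node.1 ch).getD (.nil, 0)) q := by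
  cases hcg : childGet? node.1 ch with
  | none =>
      cases q with
      | nil => exact absurd rfl hq
      | cons c q' => simp [cntAt, hcg, childGet?]
  | some u => simp [cntAt, hcg]

theorem cntAt_count_irrel (sub : PChildren) (a b : Int) (q : List Char) (hq : q ≠ []) :
    cntAt (sub, a) q = cntAt (sub, b) q := by
  cases q with
  | nil => exact absurd rfl hq
  | cons c q' => simp [cntAt]

theorem cntAt_single (node : PChildren × Int) (ch : Char) :
    cntAt node [ch] = ((childGet? node.1 ch).getD (.nil, 0)).2 := by
  cases hcg : childGet? node.1 ch with
  | none => simp [cntAt, hcg]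
  | some u => simp [cntAt, hcg]

theorem key_ne (l q1 q2 : List Char) (h : q1 ≠ q2) :
    String.ofList (l ++ q1) ≠ String.ofList (l ++ q2) :=
  fun e => h (List.append_cancel_left (ofList_inj e))

theorem key_ne_ext (l a q : List Char) (hq : q ≠ []) :
    String.ofList (l ++ a ++ q) ≠ String.ofList (l ++ a) := by
  rw [List.append_assoc]
  exact key_ne l (a ++ q) a (by simp [hq])

-- the inner loops agree: same result state; the counts stored in the (sub)trie at
-- path (take k) ++ q equal the dict entries at that key; other dict keys untouched
theorem loop_agree (full : String) :
    ∀ (s : List Char) (k : Nat) (node : PChildren × Int) (d : PySem.Dict String Int) (st : String × Int × Int),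
      s = full.toList.drop k →
      (∀ q : List Char, q ≠ [] → cntAt node q = d.getD (String.ofList (full.toList.take k ++ q)) 0) →
      (trieLoop node (PySem.List.enumerate s (k : Int)) full st).2
          = (dictLoop d (PySem.List.enumerate s (k : Int)) full st).2
      ∧ (∀ q : List Char, q ≠ [] →
          cntAt (trieLoop node (PySem.List.enumerate s (k : Int)) full st).1 q
            = (dictLoop d (PySem.List.enumerate s (k : Int)) full st).1.getD
                (String.ofList (full.toList.take k ++ q)) 0)
      ∧ (∀ key : String, (∀ q : List Char, q ≠ [] → key ≠ String.ofList (full.toList.take k ++ q)) →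
          (dictLoop d (PySem.List.enumerate s (k : Int)) full st).1.getD key 0 = d.getD key 0)
      ∧ (trieLoop node (PySem.List.enumerate s (k : Int)) full st).1.2 = node.2 := by
  intro s
  induction s with
  | nil =>
      intro k node d st _ hinv
      refine ⟨rfl, ?_, ?_, rfl⟩
      · intro q hq; simpa [PySem.List.enumerate, trieLoop, dictLoop] using hinv q hq
      · intro key _; simp [PySem.List.enumerate, dictLoop]
  | cons ch s' ih =>
      intro k node d st hs hinv
      have hk1 : ((k : Int) + 1) = ((k + 1 : Nat) : Int) := by push_cast; ring
      have hgetk : full.toList[k]? = some ch := by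
        have h0 : (full.toList.drop k)[0]? = some ch := by rw [← hs]; rfl
        simpa using h0
      have htake : full.toList.take (k + 1) = full.toList.take k ++ [ch] := by
        rw [List.take_add_one, hgetk]; rfl
      have hdrop : s' = full.toList.drop (k + 1) := by
        have := congrArg List.tail hs
        simpa [List.tail_drop] using this
      have henum : PySem.List.enumerate (ch :: s') (k : Int)
          = ((k : Int), ch) :: PySem.List.enumerate s' (((k + 1 : Nat)) : Int) := by
        rw [PySem.List.enumerate_cons, hk1]
      rw [henum]
      simp only [trieLoop, dictLoop]
      have hkey : PySem.Str.slice full none (some ((k : Int) + 1))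
          = String.ofList (full.toList.take k ++ [ch]) := by
        rw [key_eq, htake]
      have hc : ((childGet? node.1 ch).getD (.nil, 0)).2 + 1
          = d.getD (PySem.Str.slice full none (some ((k : Int) + 1))) 0 + 1 := by
        rw [hkey, ← cntAt_single, hinv [ch] (by simp)]
      rw [hkey] at hc ⊢
      rw [hc]
      have hinv' : ∀ q : List Char, q ≠ [] →
          cntAt (((childGet? node.1 ch).getD (PChildren.nil, 0)).1,
                 d.getD (String.ofList (full.toList.take k ++ [ch])) 0 + 1) q
            = (d.insert (String.ofList (full.toList.take k ++ [ch]))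
                 (d.getD (String.ofList (full.toList.take k ++ [ch])) 0 + 1)).getD
                (String.ofList (full.toList.take (k + 1) ++ q)) 0 := by
        intro q hq
        have hL : cntAt (((childGet? node.1 ch).getD (PChildren.nil, 0)).1,
            d.getD (String.ofList (full.toList.take k ++ [ch])) 0 + 1) q
            = cntAt node (ch :: q) := by
          rw [cntAt_count_irrel _ _ ((childGet? node.1 ch).getD (PChildren.nil, 0)).2 q hq]
          rw [cntAt_cons node ch q hq]
        rw [hL, hinv (ch :: q) (by simp), htake]
        rw [PySem.Dict.getD_insert, if_neg (key_ne_ext _ _ _ hq)]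
        simp
      obtain ⟨h1, h2, h3, h4⟩ := ih (k + 1)
        (((childGet? node.1 ch).getD (PChildren.nil, 0)).1,
          d.getD (String.ofList (full.toList.take k ++ [ch])) 0 + 1)
        (d.insert (String.ofList (full.toList.take k ++ [ch]))
          (d.getD (String.ofList (full.toList.take k ++ [ch])) 0 + 1))
        (if d.getD (String.ofList (full.toList.take k ++ [ch])) 0 + 1 > st.2.2 ∨
            (d.getD (String.ofList (full.toList.take k ++ [ch])) 0 + 1 = st.2.2 ∧ (k : Int) + 1 > st.2.1)
         then (full, (k : Int) + 1, d.getD (String.ofList (full.toList.take k ++ [ch])) 0 + 1) else st)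
        hdrop hinv'
      refine ⟨h1, ?_, ?_, trivial⟩
      · -- the level-k invariant after the step
        intro q hq
        cases q with
        | nil => exact absurd rfl hq
        | cons c' q' =>
            by_cases hcase : c' = ch
            · subst hcase
              cases q' with
              | nil =>
                  rw [cntAt_single, childGet?_childSet_self]
                  simp only [Option.getD_some]
                  rw [h4]
                  rw [h3 _ (by
                    intro q hqq
                    rw [htake]
                    exact fun e => key_ne_ext _ _ _ hqq e.symm)]
                  rw [PySem.Dict.getD_insert, if_pos rfl]
              | cons c'' q'' =>
                  have hstep : cntAt (childSet node.1 c'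
                      (trieLoop (((childGet? node.1 c').getD (PChildren.nil, 0)).1,
                          d.getD (String.ofList (full.toList.take k ++ [c'])) 0 + 1)
                        (PySem.List.enumerate s' ((k + 1 : Nat) : Int)) full
                        (if d.getD (String.ofList (full.toList.take k ++ [c'])) 0 + 1 > st.2.2 ∨
                            (d.getD (String.ofList (full.toList.take k ++ [c'])) 0 + 1 = st.2.2 ∧ (k : Int) + 1 > st.2.1)
                         then (full, (k : Int) + 1, d.getD (String.ofList (full.toList.take k ++ [c'])) 0 + 1)
                         else st)).1, node.2) (c' :: c'' :: q'')
                      = cntAt (trieLoop (((childGet? node.1 c').getD (PChildren.nil, 0)).1,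
                          d.getD (String.ofList (full.toList.take k ++ [c'])) 0 + 1)
                        (PySem.List.enumerate s' ((k + 1 : Nat) : Int)) full
                        (if d.getD (String.ofList (full.toList.take k ++ [c'])) 0 + 1 > st.2.2 ∨
                            (d.getD (String.ofList (full.toList.take k ++ [c'])) 0 + 1 = st.2.2 ∧ (k : Int) + 1 > st.2.1)
                         then (full, (k : Int) + 1, d.getD (String.ofList (full.toList.take k ++ [c'])) 0 + 1)
                         else st)).1 (c'' :: q'') := by
                    rw [cntAt_cons _ _ _ (by simp)]
                    simp [childGet?_childSet_self]
                  rw [hstep, h2 _ (by simp), htake]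
                  simp
            · have hLHS : cntAt (childSet node.1 ch
                    (trieLoop (((childGet? node.1 ch).getD (PChildren.nil, 0)).1,
                        d.getD (String.ofList (full.toList.take k ++ [ch])) 0 + 1)
                      (PySem.List.enumerate s' ((k + 1 : Nat) : Int)) full
                      (if d.getD (String.ofList (full.toList.take k ++ [ch])) 0 + 1 > st.2.2 ∨
                          (d.getD (String.ofList (full.toList.take k ++ [ch])) 0 + 1 = st.2.2 ∧ (k : Int) + 1 > st.2.1)
                       then (full, (k : Int) + 1, d.getD (String.ofList (full.toList.take k ++ [ch])) 0 + 1)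
                       else st)).1, node.2) (c' :: q')
                  = cntAt node (c' :: q') := by
                simp [cntAt, childGet?_childSet_ne node.1 ch c' _ hcase]
              rw [hLHS, hinv (c' :: q') (by simp)]
              rw [h3 _ (by
                intro q hqq
                rw [htake, List.append_assoc]
                exact key_ne _ _ _ (by simp [hcase]))]
              rw [PySem.Dict.getD_insert, if_neg (key_ne _ _ _ (by simp [hcase]))]
      · -- keys outside the walked path are untouched
        intro key hK
        rw [h3 key (by
          intro q hqq
          rw [htake]
          have := hK (ch :: q) (by simp)
          simpa using this)]
        rw [PySem.Dict.getD_insert, if_neg (hK [ch] (by simp))]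

-- outer fold invariant
theorem fold_agree :
    ∀ (strings : List String) (t : PChildren × Int) (d : PySem.Dict String Int) (st : String × Int × Int),
      (∀ q : List Char, q ≠ [] → cntAt t q = d.getD (String.ofList q) 0) →
      (strings.foldl (fun acc string => trieLoop acc.1 (PySem.List.enumerate string.toList 0) string acc.2) (t, st)).2
        = (strings.foldl (fun acc string => dictLoop acc.1 (PySem.List.enumerate string.toList 0) string acc.2) (d, st)).2 := by
  intro strings
  induction strings with
  | nil => intro t d st _; rfl
  | cons full rest ih =>
      intro t d st hinv
      have h := loop_agree full full.toList 0 t d st (by simp) (by simpa using hinv)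
      obtain ⟨h1, h2, h3, h4⟩ := h
      simp only [Nat.cast_zero] at h1 h2
      simp only [List.foldl_cons]
      rw [show (dictLoop d (PySem.List.enumerate full.toList 0) full st)
            = ((dictLoop d (PySem.List.enumerate full.toList 0) full st).1,
               (dictLoop d (PySem.List.enumerate full.toList 0) full st).2) from rfl,
          show (trieLoop t (PySem.List.enumerate full.toList 0) full st)
            = ((trieLoop t (PySem.List.enumerate full.toList 0) full st).1,
               (trieLoop t (PySem.List.enumerate full.toList 0) full st).2) from rfl]
      rw [h1]
      exact ih _ _ _ (by
        intro q hq
        have := h2 q hq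
        simpa using this)

-- ===== VERDICT (by name: the statement is the Claim_ definition above) =====
theorem longest_most_frequent_prefix_spec : Claim_equal_longest_most_frequent_prefix := by
  intro strings _
  unfold Spec_longest_most_frequent_prefix longest_most_frequent_prefix longest_most_frequent_prefix_alt
  have h := fold_agree strings (.nil, 0) PySem.Dict.empty ("", 0, 0)
    (by intro q hq; cases q with
        | nil => exact absurd rfl hq
        | cons c q => simp [cntAt, childGet?, PySem.Dict.getD_empty])
  simp only [h]
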